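-- pv_equiv track=rewrite | github.com/elijahiwanoff-arch/Transfer | pole_inspector_tool.py | combined_digit_count_match
-- ===== SOURCE A (Python) =====
-- from collections import Counter
--
-- def combined_digit_count_match(expected: str, texts: list[str]) -> bool:
--     """
--     Return True if across all `texts` we see at least the same count of each digit
--     in `expected` (ignoring order / spacing / extra chars), with no missing digits.
--     """
--     exp_ctr = Counter(ch for ch in expected if ch.isdigit())
--     got_ctr = Counter()
--     for txt in texts:
--         got_ctr.update(ch for ch in txt if ch.isdigit())
--     for digit, cnt in exp_ctr.items():
--         if got_ctr.get(digit, 0) < cnt: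
--             return False
--     return True
-- ===== SOURCE B (Python) =====
-- def combined_digit_count_match(expected: str, texts: list[str]) -> bool:
--     # Multiset matching by removal: pool all digits of texts once, then consume
--     # one pool occurrence per digit of expected; no counts are ever computed.
--     pool = [ch for t in texts for ch in t if ch.isdigit()]
--     for ch in expected:
--         if ch.isdigit():
--             if ch in pool:
--                 pool.remove(ch)
--             else:
--                 return False
--     return True
-- ===== Notes on version B (the rewrite author's own statement) =====
-- stated objective: alternative
-- what changed: A builds two Counter frequency tables by per-character Python iteration and compares them per digit; B never counts anything: it pools the digits of texts into one list and greedily consumes (list.remove) one pool occurrence per digit of expected, failing as soon as a digit cannot be removed.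
import Mathlib
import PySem

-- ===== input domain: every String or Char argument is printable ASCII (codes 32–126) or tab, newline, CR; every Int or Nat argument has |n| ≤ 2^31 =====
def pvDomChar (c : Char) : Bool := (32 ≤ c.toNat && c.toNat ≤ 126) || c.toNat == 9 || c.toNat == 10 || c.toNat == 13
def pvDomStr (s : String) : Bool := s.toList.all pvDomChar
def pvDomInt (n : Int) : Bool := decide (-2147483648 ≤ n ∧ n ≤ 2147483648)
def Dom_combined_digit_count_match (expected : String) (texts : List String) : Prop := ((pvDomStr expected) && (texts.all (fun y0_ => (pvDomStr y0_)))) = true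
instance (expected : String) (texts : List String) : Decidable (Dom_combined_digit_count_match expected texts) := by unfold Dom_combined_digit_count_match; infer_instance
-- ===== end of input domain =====

-- B replaces A's two Counter tables with greedy multiset matching by removal from a pooled digit list (same result, no counting).

-- ===== PORT A =====
-- exp_ctr = Counter(ch for ch in expected if ch.isdigit());
-- got_ctr updated per text by the counter-update fold; final loop with early return ported as .all
def combined_digit_count_match (expected : String) (texts : List String) : Bool :=
  let exp_ctr : PySem.Dict Char Int :=
    PySem.Dict.counter (expected.toList.filter PySem.Chars.isdigit)
  let got_ctr : PySem.Dict Char Int :=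
    texts.foldl
      (fun d txt => (txt.toList.filter PySem.Chars.isdigit).foldl
        (fun d ch => d.modify ch 0 (· + 1)) d)
      PySem.Dict.empty
  exp_ctr.items.all (fun p => !(decide (got_ctr.getD p.1 0 < p.2)))

-- ===== PORT B =====
-- the for-loop over expected with early return, carrying the mutable pool;
-- `ch in pool` = List.contains, pool.remove(ch) (first occurrence) = List.erase
def pvConsume : List Char → List Char → Bool
  | [], _ => true
  | ch :: rest, pool =>
    if PySem.Chars.isdigit ch then
      if pool.contains ch then pvConsume rest (pool.erase ch) else false
    else pvConsume rest pool

-- pool = [ch for t in texts for ch in t if ch.isdigit()]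
def combined_digit_count_match_alt (expected : String) (texts : List String) : Bool :=
  pvConsume expected.toList
    (texts.flatMap (fun t => t.toList.filter PySem.Chars.isdigit))

-- ===== PRECONDITION & SPEC =====
def Spec_combined_digit_count_match (expected : String) (texts : List String) (out : Bool) : Prop := out = combined_digit_count_match_alt expected texts
instance (expected : String) (texts : List String) (out : Bool) : Decidable (Spec_combined_digit_count_match expected texts out) := by unfold Spec_combined_digit_count_match; infer_instance

-- ===== CLAIM (what is proved, stated in full; the proofs are below) =====
def Claim_equal_combined_digit_count_match : Prop := ∀ (expected : String) (texts : List String), Dom_combined_digit_count_match expected texts → Spec_combined_digit_count_match expected texts (combined_digit_count_match expected texts)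

-- ===== LEMMAS AND PROOFS =====

-- the got_ctr fold counts, at any digit v, the total occurrences of v across the filtered texts
lemma pv_getD_fold_texts (texts : List String) (d : PySem.Dict Char Int) (v : Char) :
    (texts.foldl
      (fun d txt => (txt.toList.filter PySem.Chars.isdigit).foldl
        (fun d ch => d.modify ch 0 (· + 1)) d) d).getD v 0
    = d.getD v 0
      + (texts.map (fun t => ((t.toList.filter PySem.Chars.isdigit).count v : Int))).sum := by
  induction texts generalizing d with
  | nil => simp
  | cons t ts ih =>
      simp only [List.foldl_cons, ih, PySem.Dict.getD_foldl_modify_add_one, List.map_cons,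
        List.sum_cons]
      ring

-- count of a char in the pooled flatMap = sum of per-text counts
lemma pv_count_pool (texts : List String) (v : Char) :
    ((texts.flatMap (fun t => t.toList.filter PySem.Chars.isdigit)).count v : Int)
    = (texts.map (fun t => ((t.toList.filter PySem.Chars.isdigit).count v : Int))).sum := by
  induction texts with
  | nil => simp
  | cons t ts ih => simp [List.count_append, ih]

-- greedy removal succeeds exactly when every digit of l occurs in pool at least
-- as often as in l's digit filtrate (multiset inclusion)
lemma pv_consume_iff (l pool : List Char) :
    pvConsume l pool = true ↔
      ∀ v, (l.filter PySem.Chars.isdigit).count v ≤ pool.count v := by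
  induction l generalizing pool with
  | nil => simp [pvConsume]
  | cons ch rest ih =>
      by_cases hd : PySem.Chars.isdigit ch = true
      · rw [List.filter_cons_of_pos hd]
        simp only [pvConsume, hd, if_true]
        by_cases hm : pool.contains ch
        · rw [if_pos hm, ih]
          have hmem : ch ∈ pool := by simpa using hm
          have hc : 1 ≤ pool.count ch := List.one_le_count_iff.mpr hmem
          constructor
          · intro h v
            have hv := h v
            rw [List.count_erase] at hv
            rw [List.count_cons]
            by_cases hvc : v = ch
            · subst hvc
              simp only [beq_self_eq_true, if_true] at hv ⊢
              omega
            · have h1 : (ch == v) = false := beq_false_of_ne (Ne.symm hvc)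
              have h2 : (v == ch) = false := beq_false_of_ne hvc
              rw [h1] at hv
              rw [h1]
              simp only [Bool.false_eq_true, if_false] at hv ⊢
              omega
          · intro h v
            have hv := h v
            rw [List.count_cons] at hv
            rw [List.count_erase]
            by_cases hvc : v = ch
            · subst hvc
              simp only [beq_self_eq_true, if_true] at hv ⊢
              omega
            · have h1 : (ch == v) = false := beq_false_of_ne (Ne.symm hvc)
              have h2 : (v == ch) = false := beq_false_of_ne hvc
              rw [h1] at hv
              rw [h1]
              simp only [Bool.false_eq_true, if_false] at hv ⊢
              omega
        · rw [if_neg hm]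
          simp only [Bool.false_eq_true, false_iff, not_forall, not_le]
          refine ⟨ch, ?_⟩
          have hz : pool.count ch = 0 := by
            rw [List.count_eq_zero]; simpa using hm
          rw [hz, List.count_cons_self]
          omega
      · rw [List.filter_cons_of_neg hd]
        simp only [pvConsume, hd]
        exact ih pool

-- ===== VERDICT (by name: the statement is the Claim_ definition above) =====
theorem combined_digit_count_match_spec : Claim_equal_combined_digit_count_match := by
  intro expected texts _
  unfold Spec_combined_digit_count_match combined_digit_count_match combined_digit_count_match_alt
  simp only [PySem.Dict.items_counter, List.all_map]
  rw [Bool.eq_iff_iff, List.all_eq_true, pv_consume_iff]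
  constructor
  · intro h v
    by_cases hv : v ∈ PySem.Set.ofList (expected.toList.filter PySem.Chars.isdigit)
    · have := h v hv
      simp only [Function.comp, pv_getD_fold_texts, ← pv_count_pool, Bool.not_eq_true',
        decide_eq_false_iff_not, not_lt] at this
      have hz : (PySem.Dict.empty : PySem.Dict Char Int).getD v 0 = 0 := by simp
      rw [hz, zero_add] at this
      exact_mod_cast this
    · have : v ∉ expected.toList.filter PySem.Chars.isdigit := by
        intro hmem; exact hv ((PySem.Set.mem_ofList _ _).mpr hmem)
      simp [List.count_eq_zero.mpr this]
  · intro h v _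
    have := h v
    simp only [Function.comp, pv_getD_fold_texts, ← pv_count_pool, Bool.not_eq_true',
      decide_eq_false_iff_not, not_lt]
    have hz : (PySem.Dict.empty : PySem.Dict Char Int).getD v 0 = 0 := by simp
    rw [hz, zero_add]
    exact_mod_cast this
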